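-- pv_equiv track=rewrite | github.com/ajavadia/big-cats | big_ghz.py | active_wires
-- ===== SOURCE A (Python) =====
-- def active_wires(layers):
--     """
--     Returns per-layer dict with two sets:
--     - 'idle': activated wires that are idle in this layer
--     - 'gate': activated wires that are control/target of a CNOT at this layer
--     """
--     first_activation = {}
--     for l, layer in enumerate(layers):
--         for c, t in layer:
--             first_activation.setdefault(c, l)
--             first_activation.setdefault(t, l)
--     result = {}
--     for l in range(len(layers)):
--         active = {q for q, l0 in first_activation.items() if l >= l0}
--         gate = {q for c, t in layers[l] for q in (c, t)}
--         idle = active - gate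
--         result[l] = {"idle": idle, "gate": gate}
--     return result
-- ===== SOURCE B (Python) =====
-- def active_wires(layers):
--     """
--     Returns per-layer dict with two sets:
--     - 'idle': activated wires that are idle in this layer
--     - 'gate': activated wires that are control/target of a CNOT at this layer
--     """
--     seen = set()
--     active = []          # activated wires, grown incrementally layer by layer
--     result = {}
--     for l, layer in enumerate(layers):
--         gate = set()
--         for c, t in layer:
--             for q in (c, t):
--                 gate.add(q)
--                 if q not in seen:
--                     seen.add(q)
--                     active.append(q)
--         result[l] = {"idle": {q for q in active if q not in gate}, "gate": gate}
--     return result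
-- ===== Notes on version B (the rewrite author's own statement) =====
-- stated objective: alternative
-- what changed: Single pass: the two-phase scan (build a first-activation dict, then for every layer re-filter the whole dict to recompute the active set) is replaced by one incremental pass that grows the active-wire list layer by layer while collecting each layer's gate set.
import Mathlib
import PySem

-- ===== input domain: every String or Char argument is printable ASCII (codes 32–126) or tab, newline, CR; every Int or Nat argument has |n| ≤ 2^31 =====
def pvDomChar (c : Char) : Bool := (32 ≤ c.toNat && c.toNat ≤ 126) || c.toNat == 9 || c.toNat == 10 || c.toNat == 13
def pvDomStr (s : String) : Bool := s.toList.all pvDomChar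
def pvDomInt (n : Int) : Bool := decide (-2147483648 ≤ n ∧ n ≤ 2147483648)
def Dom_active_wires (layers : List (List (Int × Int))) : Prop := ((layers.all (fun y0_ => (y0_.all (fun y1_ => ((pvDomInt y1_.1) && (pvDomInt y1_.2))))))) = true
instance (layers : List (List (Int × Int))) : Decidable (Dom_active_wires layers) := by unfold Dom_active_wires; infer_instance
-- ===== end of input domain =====

-- B replaces A's two-phase scan (first-activation dict, then per-layer re-filter of the whole
-- dict) by one incremental pass growing the active set layer by layer; same cost class, return
-- values proved equal on all inputs.

-- ===== PORT A =====
-- A's 'result' dict is keyed by the loop index l (fresh, strictly increasing keys), so under the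
-- assoc-list convention each insertion appends — ported as list append, exact here.
def active_wires (layers : List (List (Int × Int))) : List (Int × List (String × List Int)) :=
  let fa : PySem.Dict Int Int :=
    (PySem.List.enumerate layers 0).foldl
      (fun d pl => pl.2.foldl (fun d p => (PySem.Dict.setdefault (PySem.Dict.setdefault d p.1 pl.1) p.2 pl.1)) d)
      PySem.Dict.empty
  (PySem.List.pyRange 0 layers.length 1).foldl
    (fun res l =>
      let active : PySem.Set Int :=
        PySem.Set.ofList ((fa.items.filter (fun p => decide (p.2 ≤ l))).map (fun p => p.1))
      let gate : PySem.Set Int :=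
        PySem.Set.ofList ((PySem.List.pyGetD layers l []).flatMap (fun p => [p.1, p.2]))
      let idle := PySem.Set.diff active gate
      res ++ [(l, [("idle", idle), ("gate", gate)])])
    []

-- ===== PORT B =====
-- one step of B's innermost loop, the body of 'for q in (c, t)':
-- gate.add(q); if q not in seen: seen.add(q); active.append(q)   on state (gate, seen, active)
def pvStepB (st : PySem.Set Int × PySem.Set Int × List Int) (q : Int) :
    PySem.Set Int × PySem.Set Int × List Int :=
  let gate := PySem.Set.add st.1 q
  if PySem.Set.contains st.2.1 q then (gate, st.2.1, st.2.2)
  else (gate, PySem.Set.add st.2.1 q, st.2.2 ++ [q])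

-- B's result dict is likewise keyed by the fresh increasing index l: insert = append, exact here.
def active_wires_alt (layers : List (List (Int × Int))) : List (Int × List (String × List Int)) :=
  (((PySem.List.enumerate layers 0).foldl
    (fun (acc : List (Int × List (String × List Int)) × PySem.Set Int × List Int) pl =>
      let st := pl.2.foldl (fun st p => pvStepB (pvStepB st p.1) p.2) (PySem.Set.empty, acc.2.1, acc.2.2)
      let idle : PySem.Set Int := PySem.Set.ofList (st.2.2.filter (fun q => !(PySem.Set.contains st.1 q)))
      (acc.1 ++ [(pl.1, [("idle", idle), ("gate", st.1)])], st.2.1, st.2.2))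
    ([], PySem.Set.empty, []))).1

-- ===== PRECONDITION & SPEC =====
def Spec_active_wires (layers : List (List (Int × Int))) (out : List (Int × List (String × List Int))) : Prop := out = active_wires_alt layers
instance (layers : List (List (Int × Int))) (out : List (Int × List (String × List Int))) : Decidable (Spec_active_wires layers out) := by unfold Spec_active_wires; infer_instance

-- ===== CLAIM (what is proved, stated in full; the proofs are below) =====
def Claim_equal_active_wires : Prop := ∀ (layers : List (List (Int × Int))), Dom_active_wires layers → Spec_active_wires layers (active_wires layers)

-- ===== LEMMAS AND PROOFS =====

def pvQs (layer : List (Int × Int)) : List Int := layer.flatMap (fun p => [p.1, p.2])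

theorem pv_pairFold {σ : Type} (f : σ → Int → σ) (layer : List (Int × Int)) (s : σ) :
    layer.foldl (fun st p => f (f st p.1) p.2) s = (pvQs layer).foldl f s := by
  induction layer generalizing s with
  | nil => rfl
  | cons p rest ih => simp [pvQs, List.foldl] at *; exact ih _

def pvEnt (act : List Int) (layer : List (Int × Int)) : List (String × List Int) :=
  [("idle", PySem.Set.ofList (act.filter (fun q => !(PySem.Set.contains (PySem.Set.ofList (pvQs layer)) q)))),
   ("gate", PySem.Set.ofList (pvQs layer))]

def pvGo : List (List (Int × Int)) → Int → PySem.Set Int → List (Int × List (String × List Int))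
  | [], _, _ => []
  | layer :: rest, k, act =>
    (k, pvEnt (PySem.Set.update act (pvQs layer)) layer) :: pvGo rest (k + 1) (PySem.Set.update act (pvQs layer))

theorem pv_stepB (g s : PySem.Set Int) (q : Int) :
    pvStepB (g, s, s) q = (PySem.Set.add g q, PySem.Set.add s q, PySem.Set.add s q) := by
  by_cases h : q ∈ s
  · simp [pvStepB, PySem.Set.add, PySem.Set.contains, h]
  · simp [pvStepB, PySem.Set.add, PySem.Set.contains, h]

theorem pv_foldQs (qs : List Int) (g s : PySem.Set Int) :
    qs.foldl pvStepB (g, s, s) = (PySem.Set.update g qs, PySem.Set.update s qs, PySem.Set.update s qs) := by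
  induction qs generalizing g s with
  | nil => rfl
  | cons q rest ih => simp only [List.foldl_cons, pv_stepB]; rw [ih]; rfl

-- B's port folds to pvGo
theorem pv_B_go (ls : List (List (Int × Int))) (k : Int)
    (res : List (Int × List (String × List Int))) (act : PySem.Set Int) :
    ((PySem.List.enumerate ls k).foldl
      (fun (acc : List (Int × List (String × List Int)) × PySem.Set Int × List Int) pl =>
        let st := pl.2.foldl (fun st p => pvStepB (pvStepB st p.1) p.2) (PySem.Set.empty, acc.2.1, acc.2.2)
        let idle : PySem.Set Int := PySem.Set.ofList (st.2.2.filter (fun q => !(PySem.Set.contains st.1 q)))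
        (acc.1 ++ [(pl.1, [("idle", idle), ("gate", st.1)])], st.2.1, st.2.2))
      (res, act, act)).1 = res ++ pvGo ls k act := by
  induction ls generalizing k res act with
  | nil => simp [PySem.List.enumerate, pvGo]
  | cons layer rest ih =>
    rw [PySem.List.enumerate_cons]
    simp only [List.foldl_cons]
    rw [pv_pairFold pvStepB layer, pv_foldQs]
    simp only [ih, pvGo, pvEnt]
    have h0 : PySem.Set.update ([] : List Int) (pvQs layer) = PySem.Set.ofList (pvQs layer) := rfl
    simp [h0, List.append_assoc]

theorem pv_dcontains (d : PySem.Dict Int Int) (q : Int) : d.contains q = PySem.Set.contains d.keys q := by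
  obtain ⟨items⟩ := d
  induction items with
  | nil => rfl
  | cons p rest ih =>
    simp [PySem.Dict.contains, PySem.Dict.keys, PySem.Set.contains] at *
    simp [BEq.comm] at ih ⊢; rw [ih]

-- first-activation dict recursion
def pvFaGo : List (List (Int × Int)) → Int → PySem.Dict Int Int → PySem.Dict Int Int
  | [], _, d => d
  | layer :: rest, k, d => pvFaGo rest (k + 1) ((pvQs layer).foldl (fun d q => PySem.Dict.setdefault d q k) d)

theorem pv_fa_go (ls : List (List (Int × Int))) (k : Int) (d : PySem.Dict Int Int) :
    (PySem.List.enumerate ls k).foldl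
      (fun d pl => pl.2.foldl (fun d p => (PySem.Dict.setdefault (PySem.Dict.setdefault d p.1 pl.1) p.2 pl.1)) d) d
    = pvFaGo ls k d := by
  induction ls generalizing k d with
  | nil => rfl
  | cons layer rest ih =>
    rw [PySem.List.enumerate_cons]
    simp only [List.foldl_cons, pvFaGo]
    rw [pv_pairFold (fun d q => PySem.Dict.setdefault d q k) layer, ih]

theorem pv_filter_discard {p : Int → Bool} (s : List Int) (q : Int) (hq : p q = false) :
    (PySem.Set.discard s q).filter p = s.filter p := by
  simp only [PySem.Set.discard, List.filter_filter]
  apply List.filter_congr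
  intro y _
  by_cases h : y = q
  · simp [h, hq]
  · simp [h]

theorem pv_sd_items (qs : List Int) (k : Int) (d : PySem.Dict Int Int) :
    (qs.foldl (fun d q => PySem.Dict.setdefault d q k) d).items
      = d.items ++ ((PySem.Set.ofList qs).filter (fun q => !(d.contains q))).map (fun q => (q, k)) := by
  induction qs generalizing d with
  | nil => simp [PySem.Set.ofList]
  | cons q rest ih =>
    simp only [List.foldl_cons]
    by_cases h : d.contains q = true
    · rw [PySem.Dict.setdefault_of_contains _ _ h, ih]
      rw [PySem.Set.ofList_cons]
      simp only [List.filter_cons, h]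
      rw [pv_filter_discard _ q (by simp [h])]
      simp
    · simp only [Bool.not_eq_true] at h
      rw [PySem.Dict.setdefault_of_not_contains _ _ h, ih]
      rw [PySem.Dict.items_insert_of_not_contains d k h]
      rw [PySem.Set.ofList_cons]
      simp only [List.filter_cons, h, Bool.not_false, if_pos]
      simp only [PySem.Set.discard, List.filter_filter]
      simp only [PySem.Dict.contains_insert]
      simp [Bool.not_or, List.append_assoc, Bool.and_comm]

def pvF (d : PySem.Dict Int Int) (l : Int) : List Int :=
  (d.items.filter (fun p => decide (p.2 ≤ l))).map (fun p => p.1)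

theorem pv_F_all (d : PySem.Dict Int Int) (l : Int) (h : ∀ p ∈ d.items, p.2 ≤ l) :
    pvF d l = d.keys := by
  unfold pvF PySem.Dict.keys
  rw [List.filter_eq_self.mpr (by intro p hp; simpa using h p hp)]

theorem pv_keys_sd (xs : List Int) (k : Int) (d : PySem.Dict Int Int) :
    (xs.foldl (fun d q => PySem.Dict.setdefault d q k) d).keys = PySem.Set.update d.keys xs := by
  unfold PySem.Dict.keys
  rw [pv_sd_items, PySem.Set.update_eq_append_filter, List.map_append]
  congr 1
  rw [List.map_map]
  simp [pv_dcontains, PySem.Set.contains, Function.comp_def]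
  rfl

theorem pv_F_sd (xs : List Int) (k l : Int) (d : PySem.Dict Int Int) :
    pvF (xs.foldl (fun d q => PySem.Dict.setdefault d q k) d) l
      = pvF d l ++ (if k ≤ l then (PySem.Set.ofList xs).filter (fun q => !(d.contains q)) else []) := by
  unfold pvF
  rw [pv_sd_items, List.filter_append, List.map_append]
  congr 1
  rw [List.filter_map]
  by_cases h : k ≤ l
  · simp [h, Function.comp_def]
  · simp [h, Function.comp_def]

theorem pv_faGo_F (ls : List (List (Int × Int))) (k l : Int) (d : PySem.Dict Int Int)
    (hv : ∀ p ∈ d.items, p.2 < k) :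
    pvF (pvFaGo ls k d) l = if l + 1 ≤ k then pvF d l
      else PySem.Set.update d.keys ((ls.take (l + 1 - k).toNat).flatMap pvQs) := by
  induction ls generalizing k d with
  | nil =>
    simp only [pvFaGo, List.take_nil, List.flatMap_nil]
    split
    · rfl
    · rename_i h1
      have h2 : PySem.Set.update d.keys [] = d.keys := rfl
      rw [h2, pv_F_all d l (fun p hp => by have := hv p hp; omega)]
  | cons layer rest ih =>
    simp only [pvFaGo]
    set d' := (pvQs layer).foldl (fun d q => PySem.Dict.setdefault d q k) d with hd'
    have hv' : ∀ p ∈ d'.items, p.2 < k + 1 := by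
      intro p hp
      rw [hd', pv_sd_items] at hp
      rcases List.mem_append.mp hp with h | h
      · have := hv p h; omega
      · obtain ⟨q, _, rfl⟩ := List.mem_map.mp h; omega
    rw [ih (k + 1) d' hv']
    by_cases h1 : l + 1 ≤ k
    · rw [if_pos (by omega), if_pos h1, hd', pv_F_sd, if_neg (by omega), List.append_nil]
    · rw [if_neg h1]
      by_cases h2 : l + 1 ≤ k + 1
      · -- l = k
        have hlk : l = k := by omega
        rw [if_pos h2, hd', pv_F_sd, if_pos (by omega)]
        rw [pv_F_all d l (fun p hp => by have := hv p hp; omega)]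
        have h3 : (l + 1 - k).toNat = 1 := by omega
        rw [h3]
        have h4 : List.flatMap pvQs (List.take 1 (layer :: rest)) = pvQs layer := by simp
        rw [h4, PySem.Set.update_eq_append_filter]
        congr 1
        apply List.filter_congr
        intro q _
        simp [pv_dcontains, PySem.Set.contains]
      · rw [if_neg h2, hd', pv_keys_sd]
        rw [← PySem.Set.update_append]
        have h3 : (l + 1 - k).toNat = (l + 1 - (k+1)).toNat + 1 := by omega
        rw [h3, List.take_succ_cons, List.flatMap_cons]

theorem pv_fa_active (layers : List (List (Int × Int))) (j : Nat) :
    pvF (pvFaGo layers 0 PySem.Dict.empty) (j : Int)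
      = PySem.Set.ofList ((layers.take (j + 1)).flatMap pvQs) := by
  rw [pv_faGo_F layers 0 (j : Int) PySem.Dict.empty (by intro p hp; simp [PySem.Dict.empty] at hp)]
  rw [if_neg (by omega)]
  have h1 : ((j : Int) + 1 - 0).toNat = j + 1 := by omega
  rw [h1]
  rfl

theorem pv_pyGetD_cons {α : Type} (x : α) (xs : List α) (j : Nat) (d : α) :
    PySem.List.pyGetD (x :: xs) ((j : Int) + 1) d = PySem.List.pyGetD xs (j : Int) d := by
  have h : ((j : Int) + 1) = ((j + 1 : Nat) : Int) := by push_cast; ring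
  rw [h, PySem.List.pyGetD_natCast, PySem.List.pyGetD_natCast]
  rfl

theorem pv_go_map (ls : List (List (Int × Int))) (k : Int) (act : PySem.Set Int) :
    pvGo ls k act = (List.range ls.length).map (fun (j : Nat) =>
      ((k + j : Int), pvEnt (PySem.Set.update act ((ls.take (j + 1)).flatMap pvQs))
        (PySem.List.pyGetD ls (j : Int) []))) := by
  induction ls generalizing k act with
  | nil => rfl
  | cons layer rest ih =>
    simp only [pvGo, List.length_cons, List.range_succ_eq_map, List.map_cons, List.map_map]
    congr 1
    · have h0 : PySem.List.pyGetD (layer :: rest) ((0 : Nat) : Int) [] = layer := by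
        rw [PySem.List.pyGetD_natCast]; rfl
      simp only [Nat.cast_zero, add_zero] at h0 ⊢
      rw [h0]
      simp
    · rw [ih (k + 1) (PySem.Set.update act (pvQs layer))]
      apply List.map_congr_left
      intro j hj
      simp only [Function.comp_apply]
      have e1 : (k + ↑(j + 1) : Int) = (k + 1 + ↑j : Int) := by push_cast; ring
      have e2 : List.take (j + 1 + 1) (layer :: rest) = layer :: List.take (j + 1) rest := rfl
      have e3 : PySem.List.pyGetD (layer :: rest) ((j + 1 : Nat) : Int) [] =
          PySem.List.pyGetD rest (j : Int) [] := by
        have h : ((j + 1 : Nat) : Int) = ((j : Int) + 1) := by push_cast; ring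
        rw [h, pv_pyGetD_cons]
      rw [Nat.succ_eq_add_one, e1, e2, e3, List.flatMap_cons, PySem.Set.update_append]

theorem pv_update_nil (xs : List Int) : PySem.Set.update ([] : List Int) xs = PySem.Set.ofList xs := rfl

theorem pv_AB (layers : List (List (Int × Int))) : active_wires layers = active_wires_alt layers := by
  have hB : active_wires_alt layers = pvGo layers 0 [] := pv_B_go layers 0 [] []
  rw [hB]
  unfold active_wires
  simp only [pv_fa_go]
  rw [PySem.List.foldl_append_singleton_eq_map]
  rw [pv_go_map layers 0 [], PySem.List.pyRange_one]
  simp only [List.nil_append, List.map_map, Int.sub_zero, Int.toNat_natCast]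
  apply List.map_congr_left
  intro j hj
  simp only [Function.comp_apply, zero_add]
  congr 1
  have hA : ((pvFaGo layers 0 PySem.Dict.empty).items.filter (fun p => decide (p.2 ≤ (j : Int)))).map (fun p => p.1)
      = PySem.Set.ofList ((layers.take (j + 1)).flatMap pvQs) := pv_fa_active layers j
  rw [hA]
  rw [pv_update_nil]
  simp only [pvEnt, PySem.Set.ofList_ofList]
  have hnd : (PySem.Set.ofList ((layers.take (j + 1)).flatMap pvQs)).Nodup := PySem.Set.nodup_ofList _
  rw [PySem.Set.ofList_eq_self_of_nodup _ (List.Nodup.filter _ hnd)]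
  rfl

-- ===== VERDICT (by name: the statement is the Claim_ definition above) =====
theorem active_wires_spec : Claim_equal_active_wires := by
  intro layers _
  unfold Spec_active_wires
  exact pv_AB layers
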